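-- pv_equiv track=rewrite | github.com/ska-telescope/ska-mid-jupyter-notebooks | src/notebook_tools/generate_fsp.py | generate_fsp_list
-- ===== SOURCE A (Python) =====
-- import math
--
-- FS_BW = 198180864
--
-- HALF_FS_BW = 99090432
--
-- def generate_fsp_list(start_freq: int, end_freq: int, target_talons: list[int]) -> list:
--     """
--     Generates a list of FSP json objects, given the start frequency, end frequency, channel list, and target talons
--     Arguments:
--     start_freq -- Requested started frequency for visibilities
--     end_freq -- Requested started frequency for visibilities
--     target_talons -- The list of talons boards to use, if using 1 or 4 of them, used to generate FSPs.
--     Returns: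
--     A list of JSON FSP config JSON objects.
--     """
--     fsp_list = []
--
--     coarse_channel_low = math.floor((start_freq + HALF_FS_BW) / FS_BW)
--     coarse_channel_high = math.floor((end_freq + HALF_FS_BW) / FS_BW)
--
--     num_fsps = list(range(coarse_channel_low, coarse_channel_high + 1))
--
--     # if len(num_fsps) > len(target_talons):
--     #     raise Exception(f"Required FSPs is lower than number of deployed talon boards {num_fsps}")
--
--     for i in range(len(num_fsps)):
--         sorted_talons = sorted(target_talons)
--         fsp_list.append(sorted_talons[i])
--
--     return fsp_list
-- ===== SOURCE B (Python) =====
-- FS_BW = 198180864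
--
-- HALF_FS_BW = 99090432
--
-- def generate_fsp_list(start_freq: int, end_freq: int, target_talons: list[int]) -> list:
--     """Sort target_talons once and return its first k elements, where k is the
--     number of coarse channels covered by [start_freq, end_freq]."""
--     low = (start_freq + HALF_FS_BW) // FS_BW
--     high = (end_freq + HALF_FS_BW) // FS_BW
--     k = high - low + 1
--     if k <= 0:
--         return []
--     return sorted(target_talons)[:k]
-- ===== Notes on version B (the rewrite author's own statement) =====
-- stated objective: simpler
-- what changed: A re-sorts target_talons on every loop iteration and appends one indexed element per iteration; B computes k = number of coarse channels, sorts once and returns the first k elements of the sorted list (no loop, no repeated sorting).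
import Mathlib
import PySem

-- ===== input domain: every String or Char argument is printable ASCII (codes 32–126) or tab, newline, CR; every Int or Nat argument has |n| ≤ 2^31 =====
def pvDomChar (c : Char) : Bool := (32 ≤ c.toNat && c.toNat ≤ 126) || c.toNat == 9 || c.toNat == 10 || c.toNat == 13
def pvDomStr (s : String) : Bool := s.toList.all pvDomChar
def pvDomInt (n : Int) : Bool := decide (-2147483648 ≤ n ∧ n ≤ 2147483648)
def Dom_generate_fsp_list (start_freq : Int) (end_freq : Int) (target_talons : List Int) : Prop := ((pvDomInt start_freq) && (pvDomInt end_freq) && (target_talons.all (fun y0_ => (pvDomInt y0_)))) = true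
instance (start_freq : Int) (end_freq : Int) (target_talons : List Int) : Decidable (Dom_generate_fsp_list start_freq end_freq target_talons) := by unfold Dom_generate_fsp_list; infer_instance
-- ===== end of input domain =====

-- Header: B sorts target_talons once and slices the first k elements, instead of
-- re-sorting inside the loop and indexing one element per iteration (objective: simpler).

-- ===== PORT A =====
-- math.floor((x + HALF_FS_BW) / FS_BW) uses float true division; on Dom (|args| ≤ 2^31)
-- the quotient's float error (< 1e-14) is far below 1/FS_BW, so it equals floor division exactly.
def generate_fsp_list (start_freq : Int) (end_freq : Int) (target_talons : List Int) : List Int :=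
  let coarse_channel_low := PySem.Int.floordiv (start_freq + 99090432) 198180864
  let coarse_channel_high := PySem.Int.floordiv (end_freq + 99090432) 198180864
  let num_fsps := PySem.List.pyRange coarse_channel_low (coarse_channel_high + 1) 1
  -- sorted_talons[i] raises IndexError out of range; Pre_ keeps i in range (default never read)
  (PySem.List.pyRange 0 (PySem.List.len num_fsps) 1).foldl
    (fun fsp_list i =>
      let sorted_talons := PySem.List.sorted target_talons (fun x => x) false
      fsp_list ++ [PySem.List.pyGetD sorted_talons i 0]) []

-- ===== PORT B =====
def generate_fsp_list_alt (start_freq : Int) (end_freq : Int) (target_talons : List Int) : List Int :=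
  let low := PySem.Int.floordiv (start_freq + 99090432) 198180864
  let high := PySem.Int.floordiv (end_freq + 99090432) 198180864
  let k := high - low + 1
  if k ≤ 0 then [] else (PySem.List.sorted target_talons (fun x => x) false).take k.toNat

-- ===== PRECONDITION & SPEC =====
-- Pre_ excludes exactly the inputs where A raises IndexError: more coarse channels than talon boards.
def Pre_generate_fsp_list (start_freq : Int) (end_freq : Int) (target_talons : List Int) : Prop :=
  let low := PySem.Int.floordiv (start_freq + 99090432) 198180864
  let high := PySem.Int.floordiv (end_freq + 99090432) 198180864
  high + 1 - low ≤ (target_talons.length : Int) ∨ high < low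
instance (start_freq : Int) (end_freq : Int) (target_talons : List Int) : Decidable (Pre_generate_fsp_list start_freq end_freq target_talons) := by unfold Pre_generate_fsp_list; infer_instance

def pvWitness_generate_fsp_list : Int × Int × List Int := (0, 198180864, [7, 3])

def Spec_generate_fsp_list (start_freq : Int) (end_freq : Int) (target_talons : List Int) (out : List Int) : Prop := out = generate_fsp_list_alt start_freq end_freq target_talons
instance (start_freq : Int) (end_freq : Int) (target_talons : List Int) (out : List Int) : Decidable (Spec_generate_fsp_list start_freq end_freq target_talons out) := by unfold Spec_generate_fsp_list; infer_instance

-- ===== CLAIM (what is proved, stated in full; the proofs are below) =====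
def Claim_equal_generate_fsp_list : Prop := ∀ (start_freq : Int) (end_freq : Int) (target_talons : List Int), Dom_generate_fsp_list start_freq end_freq target_talons → Pre_generate_fsp_list start_freq end_freq target_talons → Spec_generate_fsp_list start_freq end_freq target_talons (generate_fsp_list start_freq end_freq target_talons)

-- ===== LEMMAS AND PROOFS =====

-- ===== VERDICT (by name: the statement is the Claim_ definition above) =====
-- map over range n of getD is take n (n in range)
lemma pv_map_getD_range (s : List Int) : ∀ n : Nat, n ≤ s.length →
    (List.range n).map (fun k => s.getD k 0) = s.take n := by
  intro n
  induction n with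
  | zero => simp
  | succ m ih =>
    intro h
    rw [List.range_succ, List.map_append, ih (by omega), List.take_succ]
    simp [List.getD_eq_getElem s 0 (by omega : m < s.length),
      List.getElem?_eq_getElem (by omega : m < s.length)]

-- the shape of A loop: appending s[i] over range(n) is take n
lemma pv_loop_take (s : List Int) (n : Nat) (h : n ≤ s.length) :
    (PySem.List.pyRange 0 (n : Int) 1).foldl
      (fun acc i => acc ++ [PySem.List.pyGetD s i 0]) [] = s.take n := by
  rw [show PySem.List.pyRange 0 (n : Int) 1 = PySem.List.pyRange 0 (n : Int) from rfl,
      PySem.List.pyRange_zero_natCast, List.foldl_map,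
      PySem.List.foldl_append_singleton_eq_map]
  simp only [PySem.List.pyGetD_natCast, List.nil_append]
  exact pv_map_getD_range s n h

theorem generate_fsp_list_spec : Claim_equal_generate_fsp_list := by
  intro sf ef t _ hpre
  unfold Spec_generate_fsp_list generate_fsp_list generate_fsp_list_alt
  simp only [PySem.List.len, PySem.List.length_pyRange_one]
  set low := PySem.Int.floordiv (sf + 99090432) 198180864 with hlow
  set high := PySem.Int.floordiv (ef + 99090432) 198180864 with hhigh
  by_cases hk : high + 1 - low ≤ 0
  · rw [if_pos (by omega)]
    rw [show ((high + 1 - low).toNat : Int) = 0 by omega]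
    rfl
  · rw [if_neg (by omega)]
    unfold Pre_generate_fsp_list at hpre
    rw [← hlow, ← hhigh] at hpre
    have hle : (high + 1 - low).toNat ≤ t.length := by
      rcases hpre with h | h
      · omega
      · omega
    rw [pv_loop_take _ _ (by rwa [PySem.List.length_sorted])]
    congr 1
    omega
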